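-- pv_equiv track=rewrite | github.com/ZisenZhan/herb_project | smiles_canon_compare.py | make_pairwise_matrix
-- ===== SOURCE A (Python) =====
-- from typing import List, Tuple, Optional
--
-- def compare_strings(a: Optional[str], b: Optional[str]) -> str:
--     if a is None or b is None:
--         return "N/A"
--     return "==" if a == b else "!="
--
-- def make_pairwise_matrix(rows: List[str]) -> List[List[str]]:
--     n = len(rows)
--     mat = [["" for _ in range(n+1)] for _ in range(n+1)]
--     mat[0][0] = "#"
--     for i in range(n):
--         mat[0][i+1] = f"S{i+1}"
--         mat[i+1][0] = f"S{i+1}"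
--     for i in range(n):
--         for j in range(n):
--             mat[i+1][j+1] = compare_strings(rows[i], rows[j])
--     return mat
-- ===== SOURCE B (Python) =====
-- from typing import List
--
--
-- def make_pairwise_matrix(rows: List[str]) -> List[List[str]]:
--     n = len(rows)
--     groups = {}
--     for j in range(n):
--         groups.setdefault(rows[j], []).append(j)
--     mat = [["#"] + [f"S{k+1}" for k in range(n)]]
--     for i in range(n):
--         inner = ["!="] * n
--         for j in groups[rows[i]]:
--             inner[j] = "=="
--         mat.append([f"S{i+1}"] + inner)
--     return mat
-- ===== Notes on version B (the rewrite author's own statement) =====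
-- stated objective: faster
-- what changed: A compares every pair rows[i]==rows[j] with a nested loop over a pre-allocated mutable matrix; B builds a dict mapping each value to its list of positions in one pass, then emits each row as a '!='-prefilled list with '==' block-filled at that row's group positions, so the inner pairwise string-comparison loop disappears.
import Mathlib
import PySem

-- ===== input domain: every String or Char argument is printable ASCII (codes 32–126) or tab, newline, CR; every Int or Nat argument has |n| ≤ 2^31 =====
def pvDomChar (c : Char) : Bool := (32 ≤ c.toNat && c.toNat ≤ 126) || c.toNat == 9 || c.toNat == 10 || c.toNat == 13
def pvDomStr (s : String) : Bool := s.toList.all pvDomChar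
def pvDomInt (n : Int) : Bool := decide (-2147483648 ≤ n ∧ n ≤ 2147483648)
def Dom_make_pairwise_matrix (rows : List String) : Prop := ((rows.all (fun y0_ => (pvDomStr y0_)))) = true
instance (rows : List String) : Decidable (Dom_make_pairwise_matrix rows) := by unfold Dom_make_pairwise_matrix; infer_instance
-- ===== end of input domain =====

-- B replaces A's n×n pairwise string comparisons by one dict grouping value → positions and a
-- block fill of "==" per group over "!="-prefilled rows (objective: faster; a timing run measured B ≥ 2× faster at large n).

-- ===== PORT A =====
-- f"S{k+1}" (both Pythons build this same f-string)
def pvS (k : Nat) : String := "S" ++ PySem.Int.toStr ((k : Int) + 1)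

-- compare_strings; the "a is None or b is None" branch is unreachable here: the argument type
-- is list[str] (List String), so neither argument is ever None.
def compare_strings (a b : String) : String := if a == b then "==" else "!="

-- mat[r][c] = v on a list of lists (in every use below r and c are in range, where this is exact)
def set2 (m : List (List String)) (r c : Nat) (v : String) : List (List String) :=
  m.set r ((m.getD r []).set c v)

def make_pairwise_matrix (rows : List String) : List (List String) :=
  let n := rows.length
  -- mat = [["" for _ in range(n+1)] for _ in range(n+1)]
  let mat0 := (List.range (n+1)).map (fun _ => (List.range (n+1)).map (fun _ => ""))
  -- mat[0][0] = "#"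
  let mat1 := set2 mat0 0 0 "#"
  -- header loop; range(n) is List.range n and rows[i] is rows.getD i "" (i < n, so exact)
  let mat2 := (List.range n).foldl (fun m i => set2 (set2 m 0 (i+1) (pvS i)) (i+1) 0 (pvS i)) mat1
  -- comparison double loop
  (List.range n).foldl (fun m i =>
    (List.range n).foldl (fun m j =>
      set2 m (i+1) (j+1) (compare_strings (rows.getD i "") (rows.getD j ""))) m) mat2

-- ===== PORT B =====
-- groups.setdefault(rows[j], []).append(j): value → list of its positions
def pvGroups (rows : List String) : PySem.Dict String (List Nat) :=
  (List.range rows.length).foldl (fun d j => d.modify (rows.getD j "") [] (· ++ [j])) PySem.Dict.empty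

def make_pairwise_matrix_alt (rows : List String) : List (List String) :=
  let n := rows.length
  let groups := pvGroups rows
  (("#" :: (List.range n).map (fun k => pvS k))) ::
    (List.range n).map (fun i =>
      pvS i ::
        ((groups.getD (rows.getD i "") []).foldl (fun r j => r.set j "==")
          (List.replicate n "!=")))

-- ===== PRECONDITION & SPEC =====
def Spec_make_pairwise_matrix (rows : List String) (out : List (List String)) : Prop := out = make_pairwise_matrix_alt rows
instance (rows : List String) (out : List (List String)) : Decidable (Spec_make_pairwise_matrix rows out) := by unfold Spec_make_pairwise_matrix; infer_instance

-- ===== CLAIM (what is proved, stated in full; the proofs are below) =====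
def Claim_equal_make_pairwise_matrix : Prop := ∀ (rows : List String), Dom_make_pairwise_matrix rows → Spec_make_pairwise_matrix rows (make_pairwise_matrix rows)

-- ===== LEMMAS AND PROOFS =====

-- the common normal form both ports are shown to equal
def pvT (rows : List String) : List (List String) :=
  ("#" :: (List.range rows.length).map pvS) ::
    (List.range rows.length).map (fun i =>
      pvS i :: (List.range rows.length).map (fun j =>
        compare_strings (rows.getD i "") (rows.getD j "")))

lemma pv_getElem?_set2 (m : List (List String)) (r c : Nat) (v : String) (k : Nat) :
    (set2 m r c v)[k]? = if r = k ∧ r < m.length then some ((m.getD r []).set c v) else m[k]? := by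
  have hnone : m.length ≤ k → m[k]? = none := fun h => by rw [List.getElem?_eq_none_iff]; omega
  simp only [set2, List.getElem?_set]
  split_ifs <;> simp_all <;> omega

lemma pv_foldl_set_nodup (js : List Nat) (h : js.Nodup) (g : Nat → String) (base : List String) (k : Nat) :
    (js.foldl (fun r j => r.set j (g j)) base)[k]? =
      if k ∈ js ∧ k < base.length then some (g k) else base[k]? := by
  induction js generalizing base with
  | nil => simp
  | cons j js ih =>
    simp only [List.nodup_cons] at h
    have hnone : base.length ≤ k → base[k]? = none := fun h => by rw [List.getElem?_eq_none_iff]; omega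
    simp only [List.foldl_cons, ih h.2, List.length_set, List.mem_cons, List.getElem?_set]
    split_ifs <;> simp_all

lemma pv_foldl_set_const (js : List Nat) (base : List String) (k : Nat) :
    (js.foldl (fun r j => r.set j "==") base)[k]? =
      if k ∈ js ∧ k < base.length then some "==" else base[k]? := by
  induction js generalizing base with
  | nil => simp
  | cons j js ih =>
    have hnone : base.length ≤ k → base[k]? = none := fun h => by rw [List.getElem?_eq_none_iff]; omega
    simp only [List.foldl_cons, ih, List.length_set, List.mem_cons, List.getElem?_set]
    split_ifs <;> simp_all

lemma pv_foldl_set_succ_cons (js : List Nat) (g : Nat → String) (a : String) (t : List String) :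
    js.foldl (fun r j => r.set (j+1) (g j)) (a :: t) = a :: js.foldl (fun r j => r.set j (g j)) t := by
  induction js generalizing t with
  | nil => rfl
  | cons j js ih => simp [List.set_cons_succ, ih]

lemma pv_foldl_set_range (n : Nat) (g : Nat → String) (x : String) :
    (List.range n).foldl (fun r j => r.set j (g j)) (List.replicate n x) = (List.range n).map g := by
  apply List.ext_getElem?
  intro k
  rw [pv_foldl_set_nodup _ (List.nodup_range) g]
  simp only [List.length_replicate, List.mem_range, List.getElem?_map, List.getElem?_range,
    List.getElem?_replicate]
  by_cases hk : k < n <;> simp [hk]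

lemma pv_getD_set (m : List (List String)) (r : Nat) (x : List String) (k : Nat) :
    (m.set r x).getD k [] = if r = k ∧ r < m.length then x else m.getD k [] := by
  by_cases h : r = k ∧ r < m.length
  · obtain ⟨rfl, h2⟩ := h
    simp [List.getD_eq_getElem?_getD, List.getElem?_set, h2]
  · rw [if_neg h]
    by_cases h1 : r = k
    · subst h1
      have h2 : m.length ≤ r := by by_contra hc; exact h ⟨rfl, by omega⟩
      rw [List.set_eq_of_length_le h2]
    · simp [List.getD_eq_getElem?_getD, List.getElem?_set, h1]

lemma pv_foldl_set2_row (js : List Nat) (m : List (List String)) (r : Nat) (c : Nat → Nat)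
    (g : Nat → String) (hr : r < m.length) :
    js.foldl (fun m j => set2 m r (c j) (g j)) m
      = m.set r (js.foldl (fun row j => row.set (c j) (g j)) (m.getD r [])) := by
  induction js generalizing m with
  | nil =>
    simp only [List.foldl_nil]
    rw [List.getD_eq_getElem?_getD, List.getElem?_eq_getElem hr]
    exact (List.set_getElem_self hr).symm
  | cons j js ih =>
    simp only [List.foldl_cons]
    rw [show set2 m r (c j) (g j) = m.set r ((m.getD r []).set (c j) (g j)) from rfl]
    rw [ih _ (by simpa using hr)]
    rw [pv_getD_set]
    simp [hr, List.set_set]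


lemma pv_getD_set2 (m : List (List String)) (r c : Nat) (v : String) (k : Nat) :
    (set2 m r c v).getD k [] = if r = k ∧ r < m.length then (m.getD r []).set c v else m.getD k [] := by
  rw [show set2 m r c v = m.set r ((m.getD r []).set c v) from rfl, pv_getD_set]

lemma pv_header_fold (js : List Nat) (m : List (List String)) (h0 : 0 < m.length) (k : Nat) :
    ((js.foldl (fun m i => set2 (set2 m 0 (i+1) (pvS i)) (i+1) 0 (pvS i)) m))[k]? =
      if k = 0 then some (js.foldl (fun r i => r.set (i+1) (pvS i)) (m.getD 0 []))
      else if k - 1 ∈ js ∧ k < m.length then some ((m.getD k []).set 0 (pvS (k-1)))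
      else m[k]? := by
  induction js generalizing m with
  | nil =>
    simp only [List.foldl_nil, List.not_mem_nil, false_and, if_false]
    by_cases hk : k = 0
    · subst hk
      rw [if_pos rfl, List.getD_eq_getElem?_getD, List.getElem?_eq_getElem h0]
      rfl
    · simp [hk]
  | cons i js ih =>
    simp only [List.foldl_cons]
    set m' := set2 (set2 m 0 (i+1) (pvS i)) (i+1) 0 (pvS i) with hm'
    have hlen : m'.length = m.length := by simp [hm', set2]
    have hlen1 : (set2 m 0 (i+1) (pvS i)).length = m.length := by simp [set2]
    have hrow0 : m'.getD 0 [] = (m.getD 0 []).set (i+1) (pvS i) := by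
      rw [hm', pv_getD_set2, if_neg (by omega), pv_getD_set2, if_pos ⟨rfl, h0⟩]
    have hrowk : ∀ k', k' ≠ 0 → m'.getD k' [] =
        if i+1 = k' ∧ k' < m.length then (m.getD k' []).set 0 (pvS i) else m.getD k' [] := by
      intro k' hk'
      rw [hm', pv_getD_set2, hlen1]
      by_cases hc : i + 1 = k' ∧ k' < m.length
      · obtain ⟨h1, h2⟩ := hc
        subst h1
        rw [if_pos ⟨rfl, h2⟩, if_pos ⟨rfl, h2⟩, pv_getD_set2, if_neg (by omega)]
      · rw [if_neg (fun (h : i + 1 = k' ∧ i + 1 < m.length) => hc ⟨h.1, h.1 ▸ h.2⟩), if_neg hc, pv_getD_set2,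
          if_neg (fun h => hk' h.1.symm)]
    have hgetk : ∀ k', k' ≠ 0 → m'[k']? =
        if i+1 = k' ∧ k' < m.length then some ((m.getD k' []).set 0 (pvS i)) else m[k']? := by
      intro k' hk'
      rw [hm', pv_getElem?_set2, hlen1]
      by_cases hc : i + 1 = k' ∧ k' < m.length
      · obtain ⟨h1, h2⟩ := hc
        subst h1
        rw [if_pos ⟨rfl, h2⟩, if_pos ⟨rfl, h2⟩, pv_getD_set2, if_neg (by omega)]
      · rw [if_neg (fun (h : i + 1 = k' ∧ i + 1 < m.length) => hc ⟨h.1, h.1 ▸ h.2⟩), if_neg hc, pv_getElem?_set2,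
          if_neg (fun h => hk' h.1.symm)]
    rw [ih m' (by omega)]
    by_cases hk : k = 0
    · subst hk
      rw [if_pos rfl, if_pos rfl, hrow0]
    · rw [if_neg hk, if_neg hk, hlen]
      by_cases hc : k - 1 ∈ js ∧ k < m.length
      · rw [if_pos hc, if_pos ⟨List.mem_cons_of_mem _ hc.1, hc.2⟩, hrowk k hk]
        by_cases hik : i + 1 = k ∧ k < m.length
        · rw [if_pos hik]
          have hik' : i = k - 1 := by omega
          subst hik'
          rw [List.set_set]
        · rw [if_neg hik]
      · rw [if_neg hc, hgetk k hk]
        by_cases hik : i + 1 = k ∧ k < m.length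
        · rw [if_pos hik, if_pos ⟨by rw [List.mem_cons]; left; omega, hik.2⟩]
          have hik' : i = k - 1 := by omega
          subst hik'
          rfl
        · rw [if_neg hik]
          rw [if_neg (by
            rintro ⟨hmem, hlt⟩
            rcases List.mem_cons.mp hmem with h' | h'
            · exact hik ⟨by omega, hlt⟩
            · exact hc ⟨h', hlt⟩)]

lemma pv_foldl_set2_row_oob (js : List Nat) (m : List (List String)) (r : Nat) (c : Nat → Nat)
    (g : Nat → String) (hr : m.length ≤ r) :
    js.foldl (fun m j => set2 m r (c j) (g j)) m = m := by
  induction js generalizing m with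
  | nil => rfl
  | cons j js ih =>
    simp only [List.foldl_cons]
    rw [show set2 m r (c j) (g j) = m.set r ((m.getD r []).set (c j) (g j)) from rfl,
      List.set_eq_of_length_le hr, ih _ hr]

lemma pv_body_fold (n : Nat) (f : Nat → Nat → String) (js : List Nat) (hnd : js.Nodup)
    (m : List (List String)) (k : Nat) :
    ((js.foldl (fun m i =>
        (List.range n).foldl (fun m j => set2 m (i+1) (j+1) (f i j)) m) m))[k]? =
      if k - 1 ∈ js ∧ 1 ≤ k ∧ k < m.length then
        some ((List.range n).foldl (fun row j => row.set (j+1) (f (k-1) j)) (m.getD k []))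
      else m[k]? := by
  induction js generalizing m with
  | nil => simp
  | cons i js ih =>
    simp only [List.nodup_cons] at hnd
    simp only [List.foldl_cons]
    by_cases hin : i + 1 < m.length
    · rw [pv_foldl_set2_row _ _ _ _ _ hin]
      set X := (List.range n).foldl (fun row j => row.set (j+1) (f i j)) (m.getD (i+1) []) with hX
      rw [ih hnd.2]
      have hlen : (m.set (i+1) X).length = m.length := by simp
      rw [hlen]
      by_cases hc : k - 1 ∈ js ∧ 1 ≤ k ∧ k < m.length
      · have hne : ¬ (i + 1 = k) := by
          rintro rfl
          exact hnd.1 (by simpa using hc.1)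
        rw [if_pos hc, if_pos ⟨List.mem_cons_of_mem _ hc.1, hc.2⟩, pv_getD_set, if_neg (fun h => hne h.1)]
      · rw [if_neg hc, List.getElem?_set]
        by_cases hik : i + 1 = k
        · subst hik
          rw [if_pos rfl, if_pos hin, if_pos ⟨by simp, by omega, hin⟩]
          simp only [Nat.add_sub_cancel, hX]
        · rw [if_neg hik]
          rw [if_neg (by
            rintro ⟨hmem, h1, h2⟩
            rcases List.mem_cons.mp hmem with h' | h'
            · exact hik (by omega)
            · exact hc ⟨h', h1, h2⟩)]
    · rw [pv_foldl_set2_row_oob _ _ _ _ _ (by omega), ih hnd.2]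
      by_cases hc : k - 1 ∈ js ∧ 1 ≤ k ∧ k < m.length
      · rw [if_pos hc, if_pos ⟨List.mem_cons_of_mem _ hc.1, hc.2⟩]
      · rw [if_neg hc]
        rw [if_neg (by
          rintro ⟨hmem, h1, h2⟩
          rcases List.mem_cons.mp hmem with h' | h'
          · omega
          · exact hc ⟨h', h1, h2⟩)]

lemma pv_foldl_len {β : Type} (js : List β) (g : List (List String) → β → List (List String))
    (h : ∀ m b, (g m b).length = m.length) (m : List (List String)) :
    (js.foldl g m).length = m.length := by
  induction js generalizing m with
  | nil => rfl
  | cons j js ih => rw [List.foldl_cons, ih, h]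

lemma pv_A_eq_T (rows : List String) : make_pairwise_matrix rows = pvT rows := by
  simp only [make_pairwise_matrix]
  set n := rows.length with hn
  have hmat0 : (List.range (n+1)).map (fun _ => (List.range (n+1)).map (fun _ => ""))
      = List.replicate (n+1) (List.replicate (n+1) "") := by
    simp [List.map_const']
  rw [hmat0]
  have hmat1 : set2 (List.replicate (n+1) (List.replicate (n+1) "")) 0 0 "#"
      = ("#" :: List.replicate n "") :: List.replicate n (List.replicate (n+1) "") := by
    rw [List.replicate_succ, show set2 (List.replicate (n+1) "" :: List.replicate n (List.replicate (n+1) ""))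
        0 0 "#" = (List.replicate (n+1) "" :: List.replicate n (List.replicate (n+1) "")).set 0
          (((List.replicate (n+1) "" :: List.replicate n (List.replicate (n+1) "")).getD 0 []).set 0 "#") from rfl]
    rw [List.getD_cons_zero, List.replicate_succ, List.set_cons_zero, List.set_cons_zero]
  rw [hmat1]
  set mat1 := ("#" :: List.replicate n "") :: List.replicate n (List.replicate (n+1) "") with hm1
  have hlen1 : mat1.length = n + 1 := by simp [hm1]
  have hrowk1 : ∀ k, 1 ≤ k → k < n + 1 → mat1.getD k [] = List.replicate (n+1) "" := by
    intro k h1 h2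
    rw [hm1, show k = (k-1) + 1 by omega, List.getD_cons_succ,
      List.getD_eq_getElem?_getD, List.getElem?_replicate, if_pos (by omega)]
    rfl
  set mat2 := (List.range n).foldl (fun m i => set2 (set2 m 0 (i+1) (pvS i)) (i+1) 0 (pvS i)) mat1 with hm2
  have hlen2 : mat2.length = n + 1 := by
    rw [hm2]
    rw [pv_foldl_len _ _ (fun m b => by simp [set2]) mat1, hlen1]
  apply List.ext_getElem?
  intro k
  rw [pv_body_fold n _ (List.range n) List.nodup_range mat2 k]
  by_cases hk0 : k = 0
  · subst hk0
    simp only [Nat.lt_irrefl, false_and, and_false, if_neg (fun h => by omega : ¬ (0 - 1 ∈ List.range n ∧ 1 ≤ 0 ∧ 0 < mat2.length))]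
    rw [hm2, pv_header_fold _ _ (by rw [hlen1]; omega) 0, if_pos rfl]
    rw [hm1, List.getD_cons_zero, pv_foldl_set_succ_cons, pv_foldl_set_range]
    rfl
  · by_cases hkn : k < n + 1
    · have hc : k - 1 ∈ List.range n ∧ 1 ≤ k ∧ k < mat2.length := by
        refine ⟨List.mem_range.mpr (by omega), by omega, by omega⟩
      rw [if_pos hc]
      have hget2 : mat2.getD k [] = (pvS (k-1)) :: List.replicate n "" := by
        rw [hm2, List.getD_eq_getElem?_getD,
          pv_header_fold _ _ (by rw [hlen1]; omega) k, if_neg hk0,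
          if_pos ⟨List.mem_range.mpr (by omega), by omega⟩,
          hrowk1 k (by omega) hkn, List.replicate_succ, List.set_cons_zero]
        rfl
      rw [hget2, pv_foldl_set_succ_cons, pv_foldl_set_range]
      rw [pvT, show k = (k-1)+1 by omega]
      rw [List.getElem?_cons_succ, List.getElem?_map, List.getElem?_range]
      simp only [Nat.add_sub_cancel, List.getElem?_eq_getElem, Option.map_some]
      rw [← hn]
      omega
    · rw [if_neg (fun h => absurd h.2.2 (by omega))]
      have h2none : mat2[k]? = none := by
        rw [List.getElem?_eq_none_iff, hlen2]
        omega
      rw [h2none]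
      symm
      rw [List.getElem?_eq_none_iff]
      simp only [pvT, List.length_cons, List.length_map, List.length_range]
      omega

lemma pv_mem_groups (rows : List String) (v : String) (k : Nat) :
    k ∈ (pvGroups rows).getD v [] ↔ k < rows.length ∧ rows.getD k "" = v := by
  unfold pvGroups
  rw [show (List.range rows.length).foldl (fun d j => d.modify (rows.getD j "") [] (· ++ [j])) PySem.Dict.empty
      = ((List.range rows.length).map (fun j => (rows.getD j "", j))).foldl
          (fun d p => d.modify p.1 [] (· ++ [p.2])) PySem.Dict.empty from by rw [List.foldl_map]]
  rw [PySem.Dict.getD_foldl_modify_append]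
  simp only [PySem.Dict.getD_empty, List.nil_append, List.mem_map, List.mem_filter,
    List.mem_range, beq_iff_eq]
  constructor
  · rintro ⟨p, ⟨⟨j', hj', rfl⟩, hs⟩, rfl⟩
    exact ⟨hj', hs⟩
  · rintro ⟨hk, hv⟩
    exact ⟨(rows.getD k "", k), ⟨⟨k, hk, rfl⟩, hv⟩, rfl⟩

lemma pv_inner_row (rows : List String) (i : Nat) :
    ((pvGroups rows).getD (rows.getD i "") []).foldl (fun r j => r.set j "==")
        (List.replicate rows.length "!=")
      = (List.range rows.length).map (fun j => compare_strings (rows.getD i "") (rows.getD j "")) := by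
  apply List.ext_getElem?
  intro k
  have hr : ((List.range rows.length).map (fun j => compare_strings (rows.getD i "") (rows.getD j "")))[k]?
      = if k < rows.length then some (compare_strings (rows.getD i "") (rows.getD k "")) else none := by
    by_cases h : k < rows.length
    · simp [List.getElem?_map, List.getElem?_range, h]
    · simp [List.getElem?_map, List.getElem?_range, h]
  rw [pv_foldl_set_const, hr, List.length_replicate, List.getElem?_replicate]
  by_cases hk : k < rows.length
  · by_cases hm : k ∈ (pvGroups rows).getD (rows.getD i "") []
    · have hv := (pv_mem_groups rows _ k).mp hm
      rw [if_pos ⟨hm, hk⟩, if_pos hk]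
      rw [compare_strings, if_pos (by rw [beq_iff_eq, hv.2])]
    · have hv : ¬ rows.getD k "" = rows.getD i "" :=
        fun h => hm ((pv_mem_groups rows _ k).mpr ⟨hk, h⟩)
      rw [if_neg (fun h => hm h.1), if_pos hk, if_pos hk]
      rw [compare_strings, if_neg (by rw [beq_iff_eq]; exact fun h => hv h.symm)]
  · rw [if_neg (fun h => hk h.2), if_neg hk, if_neg hk]

lemma pv_B_eq_T (rows : List String) : make_pairwise_matrix_alt rows = pvT rows := by
  simp only [make_pairwise_matrix_alt, pvT]
  refine congrArg _ (List.map_congr_left (fun i _ => ?_))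
  rw [pv_inner_row]

-- ===== VERDICT (by name: the statement is the Claim_ definition above) =====
theorem make_pairwise_matrix_spec : Claim_equal_make_pairwise_matrix := by
  intro rows _
  unfold Spec_make_pairwise_matrix
  rw [pv_A_eq_T, pv_B_eq_T]
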